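-- pv_equiv track=rewrite | github.com/elioverhoef/AdventOfCode | 8/8.py | get_surrounding_trees
-- ===== SOURCE A (Python) =====
-- def get_surrounding_trees(trees) -> int:
--     visible_trees = 0
--     first_time = True
--     for row in trees:
--         visible_trees += 2
--         if first_time:
--             first_time = False
--             visible_trees += 2 * len(row) - 4
--     return visible_trees
-- ===== SOURCE B (Python) =====
-- def get_surrounding_trees(trees) -> int:
--     if not trees:
--         return 0
--     return 2 * len(trees) + 2 * len(trees[0]) - 4
-- ===== Notes on version B (the rewrite author's own statement) =====
-- stated objective: simpler
-- what changed: Replaced the row loop and first_time flag with a closed-form expression 2*rows + 2*cols0 - 4 (guarding the empty grid), removing iteration entirely.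
import Mathlib
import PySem

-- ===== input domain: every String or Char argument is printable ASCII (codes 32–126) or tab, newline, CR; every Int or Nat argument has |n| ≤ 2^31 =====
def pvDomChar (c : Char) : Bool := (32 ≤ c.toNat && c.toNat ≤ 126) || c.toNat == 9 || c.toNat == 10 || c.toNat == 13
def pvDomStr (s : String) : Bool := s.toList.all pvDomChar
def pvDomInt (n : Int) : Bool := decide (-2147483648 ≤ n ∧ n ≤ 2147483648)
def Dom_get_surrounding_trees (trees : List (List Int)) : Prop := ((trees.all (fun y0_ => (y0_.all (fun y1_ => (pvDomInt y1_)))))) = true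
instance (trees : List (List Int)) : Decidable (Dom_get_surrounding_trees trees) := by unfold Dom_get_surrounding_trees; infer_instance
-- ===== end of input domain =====

-- B replaces the row loop with the closed form 2*rows + 2*cols0 - 4 (empty grid gives 0): simpler, no iteration.

-- ===== PORT A =====
-- literal transliteration of A's loop body: state (visible_trees, first_time)
def pvStepA (st : Int × Bool) (row : List Int) : Int × Bool :=
  let visible := st.1 + 2
  if st.2 then (visible + 2 * (row.length : Int) - 4, false)
  else (visible, st.2)

def get_surrounding_trees (trees : List (List Int)) : Int :=
  (trees.foldl pvStepA (0, true)).1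

-- ===== PORT B =====
def get_surrounding_trees_alt (trees : List (List Int)) : Int :=
  match trees with
  | [] => 0
  | r :: _ => 2 * (trees.length : Int) + 2 * (r.length : Int) - 4

-- ===== PRECONDITION & SPEC =====
def Spec_get_surrounding_trees (trees : List (List Int)) (out : Int) : Prop := out = get_surrounding_trees_alt trees
instance (trees : List (List Int)) (out : Int) : Decidable (Spec_get_surrounding_trees trees out) := by unfold Spec_get_surrounding_trees; infer_instance

-- ===== CLAIM (what is proved, stated in full; the proofs are below) =====
def Claim_equal_get_surrounding_trees : Prop := ∀ (trees : List (List Int)), Dom_get_surrounding_trees trees → Spec_get_surrounding_trees trees (get_surrounding_trees trees)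

-- ===== LEMMAS AND PROOFS =====

-- after the first row, first_time is false: every remaining row adds exactly 2
theorem pv_foldl_false (rest : List (List Int)) (acc : Int) :
    (rest.foldl pvStepA (acc, false)) = (acc + 2 * (rest.length : Int), false) := by
  induction rest generalizing acc with
  | nil => simp
  | cons r rs ih =>
    rw [List.foldl_cons, show pvStepA (acc, false) r = (acc + 2, false) from rfl, ih]
    simp only [List.length_cons]
    push_cast
    ring_nf

-- ===== VERDICT (by name: the statement is the Claim_ definition above) =====
theorem get_surrounding_trees_spec : Claim_equal_get_surrounding_trees := by
  intro trees _
  unfold Spec_get_surrounding_trees get_surrounding_trees get_surrounding_trees_alt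
  cases trees with
  | nil => simp
  | cons r rs =>
    rw [List.foldl_cons,
      show pvStepA (0, true) r = (2 * (r.length : Int) - 2, false) by
        simp [pvStepA]; ring,
      pv_foldl_false]
    simp only [List.length_cons]
    push_cast
    ring
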